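-- pv_equiv track=rewrite | github.com/kawahara-dev0/StrategicSurveyEngine | backend/app/routers/manager_export.py | _pii_str
-- ===== SOURCE A (Python) =====
-- def _pii_str(disclosed_pii: dict | None) -> str:
--     if not disclosed_pii:
--         return ""
--     parts = []
--     for label in ("Name", "Email", "Department"):
--         if v := disclosed_pii.get(label):
--             parts.append(f"{label}: {v}")
--     for k, v in disclosed_pii.items():
--         if k not in ("Name", "Email", "Department") and v:
--             parts.append(f"{k}: {v}")
--     return ", ".join(parts)
-- ===== SOURCE B (Python) =====
-- def _pii_str(disclosed_pii: dict | None) -> str: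
--     if not disclosed_pii:
--         return ""
--     prio = {"Name": 0, "Email": 1, "Department": 2}
--     ordered = sorted(disclosed_pii.items(), key=lambda kv: prio.get(kv[0], 3))
--     return ", ".join(f"{k}: {v}" for k, v in ordered if v)
-- ===== Notes on version B (the rewrite author's own statement) =====
-- stated objective: idiomatic
-- what changed: Replaces A's two explicit scans (three hard-coded lookups plus a membership-filtered second loop) with a priority-index dict and one stable sort of the items, followed by a single truthiness-filtered join.
import Mathlib
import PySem

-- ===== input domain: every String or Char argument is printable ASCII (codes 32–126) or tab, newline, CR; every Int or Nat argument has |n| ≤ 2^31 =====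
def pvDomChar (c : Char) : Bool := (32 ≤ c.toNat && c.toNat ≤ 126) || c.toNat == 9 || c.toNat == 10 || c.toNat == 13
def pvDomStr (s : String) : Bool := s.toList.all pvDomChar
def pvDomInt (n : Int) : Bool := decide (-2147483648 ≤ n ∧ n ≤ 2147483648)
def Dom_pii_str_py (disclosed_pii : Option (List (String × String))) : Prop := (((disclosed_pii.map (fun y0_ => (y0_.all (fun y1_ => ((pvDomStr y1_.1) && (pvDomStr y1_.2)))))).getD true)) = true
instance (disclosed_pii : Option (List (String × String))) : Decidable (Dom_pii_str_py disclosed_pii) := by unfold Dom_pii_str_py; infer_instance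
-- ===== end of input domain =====

-- B replaces A's two explicit scans with a priority-index dict, one stable sort of the
-- items and a single truthiness-filtered join (more idiomatic; same observable behaviour).

-- ===== PORT A =====
def pii_str_py (disclosed_pii : Option (List (String × String))) : String :=
  match disclosed_pii with
  | none => ""
  | some items =>
    if items = [] then ""
    else
      let d := PySem.Dict.ofList items
      let parts : List String :=
        ["Name", "Email", "Department"].foldl (fun parts label =>
          match d.get? label with
          | some v => if v ≠ "" then parts ++ [label ++ ": " ++ v] else parts
          | none => parts) []
      let parts :=
        d.items.foldl (fun parts kv =>
          if (kv.1 ≠ "Name" ∧ kv.1 ≠ "Email" ∧ kv.1 ≠ "Department") ∧ kv.2 ≠ "" then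
            parts ++ [kv.1 ++ ": " ++ kv.2]
          else parts) parts
      PySem.Str.join ", " parts

-- ===== PORT B =====
def pii_str_py_alt (disclosed_pii : Option (List (String × String))) : String :=
  match disclosed_pii with
  | none => ""
  | some items =>
    if items = [] then ""
    else
      let d := PySem.Dict.ofList items
      let prio : PySem.Dict String Int :=
        PySem.Dict.ofList [("Name", 0), ("Email", 1), ("Department", 2)]
      let ordered := PySem.List.sorted d.items (fun kv => prio.getD kv.1 3)
      PySem.Str.join ", "
        ((ordered.filter (fun kv => kv.2 ≠ "")).map (fun kv => kv.1 ++ ": " ++ kv.2))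

-- ===== PRECONDITION & SPEC =====
def Spec_pii_str_py (disclosed_pii : Option (List (String × String))) (out : String) : Prop := out = pii_str_py_alt disclosed_pii
instance (disclosed_pii : Option (List (String × String))) (out : String) : Decidable (Spec_pii_str_py disclosed_pii out) := by unfold Spec_pii_str_py; infer_instance

-- ===== CLAIM (what is proved, stated in full; the proofs are below) =====
def Claim_equal_pii_str_py : Prop := ∀ (disclosed_pii : Option (List (String × String))), Dom_pii_str_py disclosed_pii → Spec_pii_str_py disclosed_pii (pii_str_py disclosed_pii)

-- ===== LEMMAS AND PROOFS =====

-- insertBy walks past a prefix it does not insert before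
theorem insertBy_append_of_not_before {α : Type} (before : α → α → Bool) (x : α)
    (ys zs : List α) (h : ∀ y ∈ ys, before x y = false) :
    PySem.List.insertBy before x (ys ++ zs) = ys ++ PySem.List.insertBy before x zs := by
  induction ys with
  | nil => simp
  | cons y ys ih =>
    simp only [List.cons_append, PySem.List.insertBy, h y (by simp)]
    simp only [Bool.false_eq_true, if_false, List.cons.injEq, true_and]
    exact ih (fun y hy => h y (by simp [hy]))

-- insertBy puts x in front of a list it is before everywhere
theorem insertBy_of_forall_before {α : Type} (before : α → α → Bool) (x : α)
    (zs : List α) (h : ∀ z ∈ zs, before x z = true) :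
    PySem.List.insertBy before x zs = x :: zs := by
  cases zs with
  | nil => rfl
  | cons z zs => simp [PySem.List.insertBy, h z (by simp)]

-- a stable sort by a key valued in {0,1,2,3} is the concatenation of the four filters
theorem sorted_four_blocks {α : Type} (xs : List α) (key : α → Int)
    (h : ∀ x ∈ xs, 0 ≤ key x ∧ key x ≤ 3) :
    PySem.List.sorted xs key =
      xs.filter (fun x => key x == 0) ++ xs.filter (fun x => key x == 1) ++
      xs.filter (fun x => key x == 2) ++ xs.filter (fun x => key x == 3) := by
  rw [PySem.List.sorted_eq_foldl_insertBy]
  induction xs using List.reverseRecOn with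
  | nil => rfl
  | append_singleton xs x ih =>
    have hxs : ∀ y ∈ xs, 0 ≤ key y ∧ key y ≤ 3 := fun y hy => h y (by simp [hy])
    have hx : 0 ≤ key x ∧ key x ≤ 3 := h x (by simp)
    rw [List.foldl_append, ih hxs]
    simp only [List.foldl_cons, List.foldl_nil, List.filter_append]
    set before := fun a b => decide (key a < key b) with hb
    have hkey : key x = 0 ∨ key x = 1 ∨ key x = 2 ∨ key x = 3 := by omega
    have hno : ∀ (i : Int), key x ≥ i → ∀ y ∈ xs.filter (fun z => key z == i), before x y = false := by
      intro i hi y hy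
      have := List.of_mem_filter hy
      simp only [beq_iff_eq] at this
      simp [hb, this]; omega
    have hyes : ∀ (i : Int), key x < i → ∀ y ∈ xs.filter (fun z => key z == i), before x y = true := by
      intro i hi y hy
      have := List.of_mem_filter hy
      simp only [beq_iff_eq] at this
      simp [hb, this]; omega
    rcases hkey with h0 | h1 | h2 | h3
    all_goals simp only [List.append_assoc, List.filter_singleton]
    · rw [insertBy_append_of_not_before _ _ _ _ (hno 0 (by omega))]
      rw [insertBy_of_forall_before _ _ _ (by
        intro z hz
        simp only [List.mem_append] at hz
        rcases hz with hz | hz | hz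
        exacts [hyes 1 (by omega) z hz, hyes 2 (by omega) z hz, hyes 3 (by omega) z hz])]
      simp [h0]
    · rw [insertBy_append_of_not_before _ _ _ _ (hno 0 (by omega))]
      rw [insertBy_append_of_not_before _ _ _ _ (hno 1 (by omega))]
      rw [insertBy_of_forall_before _ _ _ (by
        intro z hz
        simp only [List.mem_append] at hz
        rcases hz with hz | hz
        exacts [hyes 2 (by omega) z hz, hyes 3 (by omega) z hz])]
      simp [h1]
    · rw [insertBy_append_of_not_before _ _ _ _ (hno 0 (by omega))]
      rw [insertBy_append_of_not_before _ _ _ _ (hno 1 (by omega))]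
      rw [insertBy_append_of_not_before _ _ _ _ (hno 2 (by omega))]
      rw [insertBy_of_forall_before _ _ _ (fun z hz => hyes 3 (by omega) z hz)]
      simp [h2]
    · rw [insertBy_append_of_not_before _ _ _ _ (hno 0 (by omega))]
      rw [insertBy_append_of_not_before _ _ _ _ (hno 1 (by omega))]
      rw [insertBy_append_of_not_before _ _ _ _ (hno 2 (by omega))]
      rw [PySem.List.insertBy_of_forall_not_before _ _ _ (hno 3 (by omega))]
      simp [h3]

-- the filter on a Nodup-keyed association list picks exactly the one matching pair
theorem filter_fst_eq_of_nodup {ν : Type} (l : List (String × ν)) (c : String) (v : ν)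
    (hnd : (l.map Prod.fst).Nodup) (hmem : (c, v) ∈ l) :
    l.filter (fun kv => kv.1 == c) = [(c, v)] := by
  induction l with
  | nil => simp at hmem
  | cons p l ih =>
    simp only [List.map_cons, List.nodup_cons] at hnd
    rcases List.mem_cons.mp hmem with hp | hp
    · subst hp
      simp only [List.filter_cons, beq_self_eq_true, if_true, List.cons.injEq, true_and]
      apply List.filter_eq_nil_iff.mpr
      intro kv hkv
      simp only [beq_iff_eq]
      intro hc
      exact hnd.1 (List.mem_map.mpr ⟨kv, hkv, by simp [hc]⟩)
    · have hne : p.1 ≠ c := by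
        intro hc
        exact hnd.1 (by
          have := List.mem_map_of_mem (f := Prod.fst) hp
          simpa [hc] using this)
      simp only [List.filter_cons, beq_iff_eq, hne, if_false]
      exact ih hnd.2 hp

theorem filter_fst_eq_nil {ν : Type} (l : List (String × ν)) (c : String)
    (hnot : c ∉ l.map Prod.fst) :
    l.filter (fun kv => kv.1 == c) = [] := by
  apply List.filter_eq_nil_iff.mpr
  intro kv hkv
  simp only [beq_iff_eq]
  intro hc
  exact hnot (hc ▸ List.mem_map_of_mem (f := Prod.fst) hkv)

-- the priority dict as a case split
theorem prio_getD (c : String) :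
    (PySem.Dict.ofList [("Name", (0:Int)), ("Email", 1), ("Department", 2)]).getD c 3 =
      if c = "Name" then 0 else if c = "Email" then 1 else if c = "Department" then 2 else 3 := by
  have hd : PySem.Dict.ofList [("Name", (0:Int)), ("Email", 1), ("Department", 2)] =
      PySem.Dict.mk [("Name", 0), ("Email", 1), ("Department", 2)] := by decide
  rw [hd]
  simp only [PySem.Dict.getD, PySem.Dict.get?_mk_cons, beq_iff_eq]
  by_cases h1 : c = "Name" <;> by_cases h2 : c = "Email" <;> by_cases h3 : c = "Department" <;>
    simp_all [eq_comm, PySem.Dict.get?]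

-- one optional labelled part, as A's first loop produces it
def partOf (d : PySem.Dict String String) (label : String) : List String :=
  match d.get? label with
  | some v => if v ≠ "" then [label ++ ": " ++ v] else []
  | none => []

-- a filtered-and-formatted key block equals partOf
theorem block_eq_partOf (d : PySem.Dict String String) (label : String)
    (hnd : d.keys.Nodup) :
    ((d.items.filter (fun kv => kv.1 == label)).filter (fun kv => kv.2 ≠ "")).map
        (fun kv => kv.1 ++ ": " ++ kv.2) = partOf d label := by
  have hnd' : (d.items.map Prod.fst).Nodup := hnd
  unfold partOf
  cases hg : d.get? label with
  | none =>
    have hnot : label ∉ d.items.map Prod.fst := by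
      intro hmem
      rcases List.mem_map.mp hmem with ⟨kv, hkv, hfst⟩
      have : d.get? label = some kv.2 := by
        have : (label, kv.2) ∈ d.items := by
          have : kv = (label, kv.2) := by
            cases kv; simp_all
          exact this ▸ hkv
        exact (PySem.Dict.get?_eq_some_iff_mem_items d label kv.2 hnd).mpr this
      simp [hg] at this
    rw [filter_fst_eq_nil _ _ hnot]
    rfl
  | some v =>
    have hmem : (label, v) ∈ d.items :=
      (PySem.Dict.get?_eq_some_iff_mem_items d label v hnd).mp hg
    rw [filter_fst_eq_of_nodup _ _ _ hnd' hmem]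
    by_cases hv : v = "" <;> simp [hv]

-- ===== VERDICT (by name: the statement is the Claim_ definition above) =====
theorem pii_str_py_spec : Claim_equal_pii_str_py := by
  intro disclosed_pii _
  unfold Spec_pii_str_py pii_str_py pii_str_py_alt
  cases disclosed_pii with
  | none => rfl
  | some items =>
    by_cases hnil : items = []
    · simp [hnil]
    · simp only [hnil, if_false]
      set d := PySem.Dict.ofList items with hd
      have hnd : d.keys.Nodup := PySem.Dict.nodup_keys_ofList items
      set key : String × String → Int :=
        fun kv => (PySem.Dict.ofList [("Name", (0:Int)), ("Email", 1), ("Department", 2)]).getD kv.1 3 with hkeydef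
      have hkey : ∀ kv : String × String, key kv =
          if kv.1 = "Name" then 0 else if kv.1 = "Email" then 1 else
          if kv.1 = "Department" then 2 else 3 := fun kv => prio_getD kv.1
      -- B's sorted list splits into the four key blocks
      have hsorted : PySem.List.sorted d.items key =
          d.items.filter (fun x => key x == 0) ++ d.items.filter (fun x => key x == 1) ++
          d.items.filter (fun x => key x == 2) ++ d.items.filter (fun x => key x == 3) := by
        apply sorted_four_blocks
        intro x _
        rw [hkey x]
        split_ifs <;> omega
      -- the key blocks are the label filters
      have hf0 : d.items.filter (fun x => key x == 0) =
          d.items.filter (fun kv => kv.1 == "Name") := by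
        apply List.filter_congr
        intro kv _
        rw [hkey kv]
        by_cases h : kv.1 = "Name" <;> simp [h] <;> split_ifs <;> simp
      have hf1 : d.items.filter (fun x => key x == 1) =
          d.items.filter (fun kv => kv.1 == "Email") := by
        apply List.filter_congr
        intro kv _
        rw [hkey kv]
        by_cases h : kv.1 = "Email" <;> by_cases hn : kv.1 = "Name" <;>
          simp_all <;> split_ifs <;> simp_all
      have hf2 : d.items.filter (fun x => key x == 2) =
          d.items.filter (fun kv => kv.1 == "Department") := by
        apply List.filter_congr
        intro kv _
        rw [hkey kv]
        by_cases h : kv.1 = "Department" <;> by_cases hn : kv.1 = "Name" <;>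
          by_cases he : kv.1 = "Email" <;> simp_all
      have hf3 : d.items.filter (fun x => key x == 3) =
          d.items.filter (fun kv =>
            decide ((kv.1 ≠ "Name" ∧ kv.1 ≠ "Email" ∧ kv.1 ≠ "Department"))) := by
        apply List.filter_congr
        intro kv _
        rw [hkey kv]
        by_cases hn : kv.1 = "Name" <;> by_cases he : kv.1 = "Email" <;>
          by_cases hdep : kv.1 = "Department" <;> simp_all
      -- A's first loop
      have hloop1 : ∀ (acc : List String) (label : String),
          (fun parts label =>
            match d.get? label with
            | some v => if v ≠ "" then parts ++ [label ++ ": " ++ v] else parts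
            | none => parts) acc label = acc ++ partOf d label := by
        intro acc label
        cases hg : d.get? label with
        | none => simp [partOf, hg]
        | some v => by_cases hv : v = "" <;> simp [partOf, hg, hv]
      -- A's parts list
      have hA : (d.items.foldl (fun parts kv =>
            if (kv.1 ≠ "Name" ∧ kv.1 ≠ "Email" ∧ kv.1 ≠ "Department") ∧ kv.2 ≠ "" then
              parts ++ [kv.1 ++ ": " ++ kv.2]
            else parts)
            (["Name", "Email", "Department"].foldl (fun parts label =>
              match d.get? label with
              | some v => if v ≠ "" then parts ++ [label ++ ": " ++ v] else parts
              | none => parts) [])) =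
          partOf d "Name" ++ partOf d "Email" ++ partOf d "Department" ++
            ((d.items.filter (fun kv =>
                decide ((kv.1 ≠ "Name" ∧ kv.1 ≠ "Email" ∧ kv.1 ≠ "Department") ∧ kv.2 ≠ ""))).map
              (fun kv => kv.1 ++ ": " ++ kv.2)) := by
        rw [show (["Name", "Email", "Department"].foldl (fun parts label =>
              match d.get? label with
              | some v => if v ≠ "" then parts ++ [label ++ ": " ++ v] else parts
              | none => parts) []) =
            partOf d "Name" ++ partOf d "Email" ++ partOf d "Department" by
          simp only [List.foldl_cons, List.foldl_nil, hloop1]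
          simp]
        exact PySem.List.foldl_append_ite
          (fun kv => (kv.1 ≠ "Name" ∧ kv.1 ≠ "Email" ∧ kv.1 ≠ "Department") ∧ kv.2 ≠ "")
          (fun kv => kv.1 ++ ": " ++ kv.2) d.items _
      rw [hA, hsorted, hf0, hf1, hf2, hf3]
      simp only [List.filter_append, List.map_append]
      rw [block_eq_partOf d "Name" hnd, block_eq_partOf d "Email" hnd,
          block_eq_partOf d "Department" hnd]
      rw [List.filter_filter]
      congr 2
      refine congrArg _ ?_
      apply List.filter_congr
      intro kv _
      by_cases h1 : kv.1 = "Name" <;> by_cases h2 : kv.1 = "Email" <;>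
        by_cases h3 : kv.1 = "Department" <;> by_cases hv : kv.2 = "" <;> simp_all
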